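-- pv_equiv track=rewrite | github.com/OkamotoDaiki/InfsPreprocessing | script/subscript/subsubscript/extract_element_array.py | TransformNumberToPlace
-- ===== SOURCE A (Python) =====
-- def TransformNumberToPlace(obsplace_dic, i, j):
--     """
--     Transform number to place for being corresponded number to observation place.
--     """
--     comb = []
--     for obs_place in obsplace_dic.items():
--         key = obs_place[0]
--         value = obs_place[1]
--         if i == value:
--             comb.append(key)
--         else:
--             pass
--
--     for obs_place in obsplace_dic.items():
--         key = obs_place[0]
--         value = obs_place[1]
--         if j == value:
--             comb.append(key)
--         else:
--             pass
--     return tuple(comb)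
-- ===== SOURCE B (Python) =====
-- def TransformNumberToPlace(obsplace_dic, i, j):
--     """One pass: build a reverse index value -> keys, then concatenate the i- and j-buckets."""
--     index = {}
--     for key, value in obsplace_dic.items():
--         index.setdefault(value, []).append(key)
--     return tuple(index.get(i, []) + index.get(j, []))
-- ===== Notes on version B (the rewrite author's own statement) =====
-- stated objective: idiomatic
-- what changed: Replaces A's two full scans of the dict with a single pass that builds a reverse index (value -> list of keys) and then concatenates the i- and j-buckets via two lookups.
import Mathlib
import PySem

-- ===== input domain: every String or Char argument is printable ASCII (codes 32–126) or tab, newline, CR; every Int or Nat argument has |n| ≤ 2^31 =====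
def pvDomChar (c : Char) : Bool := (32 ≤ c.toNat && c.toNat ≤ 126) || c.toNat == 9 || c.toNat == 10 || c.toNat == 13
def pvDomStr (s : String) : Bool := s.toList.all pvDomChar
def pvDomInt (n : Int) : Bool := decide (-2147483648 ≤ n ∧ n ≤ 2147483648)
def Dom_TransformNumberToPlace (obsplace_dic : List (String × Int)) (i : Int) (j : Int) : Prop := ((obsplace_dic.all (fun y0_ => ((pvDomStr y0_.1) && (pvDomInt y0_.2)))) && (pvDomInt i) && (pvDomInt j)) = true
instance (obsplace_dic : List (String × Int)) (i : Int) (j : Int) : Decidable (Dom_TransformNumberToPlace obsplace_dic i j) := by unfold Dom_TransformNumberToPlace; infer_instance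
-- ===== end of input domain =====

-- ===== PORT A =====
-- A: two scans over the items, appending keys whose value equals i, then those equal to j.
def TransformNumberToPlace (obsplace_dic : List (String × Int)) (i : Int) (j : Int) : List String :=
  let comb := obsplace_dic.foldl (fun comb obs_place =>
    if i == obs_place.2 then comb ++ [obs_place.1] else comb) []
  let comb := obsplace_dic.foldl (fun comb obs_place =>
    if j == obs_place.2 then comb ++ [obs_place.1] else comb) comb
  comb

-- ===== PORT B =====
-- B: one pass builds a reverse index value -> keys; result is the i-bucket then the j-bucket.
def TransformNumberToPlace_alt (obsplace_dic : List (String × Int)) (i : Int) (j : Int) : List String :=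
  let index : PySem.Dict Int (List String) :=
    obsplace_dic.foldl (fun idx p => idx.modify p.2 [] (fun l => l ++ [p.1])) PySem.Dict.empty
  index.getD i [] ++ index.getD j []

-- ===== PRECONDITION & SPEC =====
def Spec_TransformNumberToPlace (obsplace_dic : List (String × Int)) (i : Int) (j : Int) (out : List String) : Prop := out = TransformNumberToPlace_alt obsplace_dic i j
instance (obsplace_dic : List (String × Int)) (i : Int) (j : Int) (out : List String) : Decidable (Spec_TransformNumberToPlace obsplace_dic i j out) := by unfold Spec_TransformNumberToPlace; infer_instance

-- ===== CLAIM (what is proved, stated in full; the proofs are below) =====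
def Claim_equal_TransformNumberToPlace : Prop := ∀ (obsplace_dic : List (String × Int)) (i : Int) (j : Int), Dom_TransformNumberToPlace obsplace_dic i j → Spec_TransformNumberToPlace obsplace_dic i j (TransformNumberToPlace obsplace_dic i j)

-- ===== LEMMAS AND PROOFS =====

-- ===== VERDICT (by name: the statement is the Claim_ definition above) =====
-- The reverse index built over pairs (key, value) answers getD v [] with the keys whose value is v.
theorem getD_index (l : List (String × Int)) (v : Int) :
    (l.foldl (fun idx p => PySem.Dict.modify idx p.2 [] (fun ks => ks ++ [p.1])) PySem.Dict.empty).getD v []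
      = (l.filter (fun p => p.2 == v)).map (fun p => p.1) := by
  have h := PySem.Dict.getD_foldl_modify_append (l := l.map Prod.swap)
    (d := (PySem.Dict.empty : PySem.Dict Int (List String))) (c := v)
  simpa [List.foldl_map, List.filter_map, List.map_map, Function.comp, Prod.swap] using h

theorem TransformNumberToPlace_spec : Claim_equal_TransformNumberToPlace := by
  intro l i j _
  show TransformNumberToPlace l i j = TransformNumberToPlace_alt l i j
  simp only [TransformNumberToPlace, TransformNumberToPlace_alt,
    PySem.List.foldl_append_if, List.nil_append, getD_index]
  congr 1 <;> · apply congrArg; apply List.filter_congr; intro p _; simp [Bool.beq_comm]
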